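-- pv_equiv track=rewrite | github.com/eggmasonvalue/further-issue-tracker | src/further_issue_tracker/renderer.py | _table_columns
-- ===== SOURCE A (Python) =====
-- from typing import Any
--
-- def _table_columns(rows: list[dict[str, Any]]) -> list[str]:
--     if not rows:
--         return []
--
--     preferred = ["entity_key"]
--     preferred.extend(
--         [
--             "nseSymbol",
--             "nsesymbol",
--             "nameOfTheCompany",
--             "companyName",
--             "issueType",
--             "issue_type",
--             "stage",
--         ]
--     )
--
--     columns = list(rows[0].keys())
--     ordered = [name for name in preferred if name in columns]
--     ordered.extend(name for name in columns if name not in ordered)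
--     return ordered
-- ===== SOURCE B (Python) =====
-- def _table_columns(rows: list[dict[str, object]]) -> list[str]:
--     if not rows:
--         return []
--
--     preferred = [
--         "entity_key",
--         "nseSymbol",
--         "nsesymbol",
--         "nameOfTheCompany",
--         "companyName",
--         "issueType",
--         "issue_type",
--         "stage",
--     ]
--     # bucket sort: one bucket per preferred rank, one overflow bucket
--     buckets = [[] for _ in range(len(preferred) + 1)]
--     for column in rows[0]:
--         try:
--             buckets[preferred.index(column)].append(column)
--         except ValueError:
--             buckets[len(preferred)].append(column)
--     result = []
--     for bucket in buckets:
--         result += bucket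
--     return result
-- ===== Notes on version B (the rewrite author's own statement) =====
-- stated objective: alternative
-- what changed: Replaces A's two staged passes (filter preferred by membership, then append columns with a growing 'not in ordered' scan) by a one-pass bucket sort: each column is appended to the bucket of its preferred-index (overflow bucket for the rest) and the buckets are concatenated.
import Mathlib
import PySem

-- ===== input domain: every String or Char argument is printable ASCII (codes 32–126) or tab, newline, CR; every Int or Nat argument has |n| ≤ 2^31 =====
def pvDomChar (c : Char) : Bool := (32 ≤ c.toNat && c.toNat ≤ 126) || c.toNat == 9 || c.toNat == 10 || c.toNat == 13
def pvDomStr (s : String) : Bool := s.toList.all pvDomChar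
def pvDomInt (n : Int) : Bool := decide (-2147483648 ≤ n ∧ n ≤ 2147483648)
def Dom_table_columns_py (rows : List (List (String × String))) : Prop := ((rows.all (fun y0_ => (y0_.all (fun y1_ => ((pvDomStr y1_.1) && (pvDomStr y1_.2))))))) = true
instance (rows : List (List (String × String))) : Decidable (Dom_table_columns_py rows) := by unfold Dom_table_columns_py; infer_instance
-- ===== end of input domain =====

-- B replaces A's two staged passes by a one-pass bucket sort over a fixed rank table (alternative; same results).

-- ===== PORT A =====
def table_columns_py (rows : List (List (String × String))) : List String :=
  match rows with
  | [] => []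
  | r :: _ =>
    let preferred : List String :=
      ["entity_key"] ++
        ["nseSymbol", "nsesymbol", "nameOfTheCompany", "companyName",
         "issueType", "issue_type", "stage"]
    let columns : List String := (PySem.Dict.ofList r).keys
    let ordered : List String := preferred.filter (fun name => columns.contains name)
    columns.foldl (fun acc name => if acc.contains name then acc else acc ++ [name]) ordered

-- ===== PORT B =====
def table_columns_py_alt (rows : List (List (String × String))) : List String :=
  match rows with
  | [] => []
  | r :: _ =>
    let preferred : List String :=
      ["entity_key", "nseSymbol", "nsesymbol", "nameOfTheCompany",
       "companyName", "issueType", "issue_type", "stage"]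
    let buckets : List (List String) :=
      ((PySem.Dict.ofList r).keys).foldl
        (fun bs column =>
          -- try: preferred.index(column)  /  except ValueError: overflow bucket
          match PySem.List.index? preferred column with
          | some i => bs.set i (bs.getD i [] ++ [column])
          | none => bs.set preferred.length (bs.getD preferred.length [] ++ [column]))
        (List.replicate (preferred.length + 1) [])
    buckets.foldl (fun result bucket => result ++ bucket) []

-- ===== PRECONDITION & SPEC =====
def Spec_table_columns_py (rows : List (List (String × String))) (out : List String) : Prop := out = table_columns_py_alt rows
instance (rows : List (List (String × String))) (out : List String) : Decidable (Spec_table_columns_py rows out) := by unfold Spec_table_columns_py; infer_instance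

-- ===== CLAIM =====
def Claim_equal_table_columns_py : Prop := ∀ (rows : List (List (String × String))), Dom_table_columns_py rows → Spec_table_columns_py rows (table_columns_py rows)

-- ===== LEMMAS AND PROOFS =====

-- proof-side name for the preferred list
def pvPref : List String :=
  ["entity_key", "nseSymbol", "nsesymbol", "nameOfTheCompany",
   "companyName", "issueType", "issue_type", "stage"]

-- B's bucket index for a column
def pvRank (c : String) : Nat :=
  match PySem.List.index? pvPref c with
  | some i => i
  | none => 8

theorem pvRank_of_not_mem {c : String} (h : c ∉ pvPref) : pvRank c = 8 := by
  have hn := (PySem.List.index?_eq_none_iff pvPref c).mpr h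
  unfold pvRank
  rw [hn]

theorem pvRank_lt_of_mem {c : String} (h : c ∈ pvPref) : pvRank c < 8 := by
  simp [pvPref] at h
  rcases h with h | h | h | h | h | h | h | h <;> subst h <;> decide

theorem pvRank_inj : ∀ c ∈ pvPref, ∀ c' ∈ pvPref, pvRank c = pvRank c' → c = c' := by decide

theorem pvRank_beq (c s : String) (i : Nat) (hs : s ∈ pvPref) (hsi : pvRank s = i) :
    (pvRank c == i) = (c == s) := by
  subst hsi
  by_cases h : c = s
  · simp [h]
  · have hne : pvRank c ≠ pvRank s := by
      intro he
      by_cases hc : c ∈ pvPref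
      · exact h (pvRank_inj c hc s hs he)
      · have h1 := pvRank_of_not_mem hc
        have h2 := pvRank_lt_of_mem hs
        omega
    simp [h, hne]

-- on a Nodup list, filtering for one value yields at most that value
theorem pv_filter_eq_single {cs : List String} (hnd : cs.Nodup) (s : String) :
    cs.filter (fun c => c == s) = if s ∈ cs then [s] else [] := by
  induction cs with
  | nil => simp
  | cons c cs ih =>
    rw [List.nodup_cons] at hnd
    rcases eq_or_ne c s with rfl | h
    · rw [List.filter_cons_of_pos (by simp), if_pos (List.mem_cons_self)]
      have : cs.filter (fun x => x == c) = [] :=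
        List.filter_eq_nil_iff.mpr (fun x hx hbe => absurd ((eq_of_beq hbe) ▸ hx) hnd.1)
      simp [this]
    · rw [List.filter_cons_of_neg (by simp [h]), ih hnd.2]
      simp [Ne.symm h]

theorem pv_filter_rank {cs : List String} (hnd : cs.Nodup) (s : String) (i : Nat)
    (hs : s ∈ pvPref) (hsi : pvRank s = i) :
    cs.filter (fun c => pvRank c == i) = if s ∈ cs then [s] else [] := by
  rw [← pv_filter_eq_single hnd s]
  exact List.filter_congr (fun c _ => pvRank_beq c s i hs hsi)

-- the bucket loop, characterized: bucket i holds the columns of rank i, in order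
theorem pv_buckets (cs : List String) :
    cs.foldl (fun bs c => bs.set (pvRank c) (bs.getD (pvRank c) [] ++ [c]))
        ((List.range 9).map (fun _ => ([] : List String)))
      = (List.range 9).map (fun i => cs.filter (fun c => pvRank c == i)) := by
  induction cs using List.reverseRecOn with
  | nil => simp
  | append_singleton cs c ih =>
    rw [List.foldl_append, List.foldl_cons, List.foldl_nil, ih]
    have hk : pvRank c < 9 := by
      by_cases h : c ∈ pvPref
      · exact Nat.lt_succ_of_lt (pvRank_lt_of_mem h)
      · simp [pvRank_of_not_mem h]
    apply List.ext_getElem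
    · simp
    · intro j hj hj'
      simp only [List.length_set, List.length_map, List.length_range] at hj
      rw [List.getElem_set]
      by_cases h : pvRank c = j
      · subst h
        rw [if_pos rfl, List.getD_eq_getElem _ _ (by simpa using hk),
          List.getElem_map, List.getElem_map, List.getElem_range, List.filter_append]
        simp
      · rw [if_neg h, List.getElem_map, List.getElem_map, List.filter_append]
        simp [h]

-- with Nodup columns, the concatenated buckets are: preferred-present in
-- preferred order, then the non-preferred columns in column order
theorem pv_bucketsB (cs : List String) (hnd : cs.Nodup) :
    ((List.range 9).map (fun i => cs.filter (fun c => pvRank c == i))).foldl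
        (fun result bucket => result ++ bucket) []
      = pvPref.filter (fun n => cs.contains n) ++ cs.filter (fun c => !(pvPref.contains c)) := by
  have hlast : cs.filter (fun c => pvRank c == 8) = cs.filter (fun c => !(pvPref.contains c)) := by
    apply List.filter_congr
    intro c _
    by_cases h : c ∈ pvPref
    · have := pvRank_lt_of_mem h
      simp [h]
      omega
    · simp [pvRank_of_not_mem h, h]
  have h0 := pv_filter_rank hnd "entity_key" 0 (by decide) (by decide)
  have h1 := pv_filter_rank hnd "nseSymbol" 1 (by decide) (by decide)
  have h2 := pv_filter_rank hnd "nsesymbol" 2 (by decide) (by decide)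
  have h3 := pv_filter_rank hnd "nameOfTheCompany" 3 (by decide) (by decide)
  have h4 := pv_filter_rank hnd "companyName" 4 (by decide) (by decide)
  have h5 := pv_filter_rank hnd "issueType" 5 (by decide) (by decide)
  have h6 := pv_filter_rank hnd "issue_type" 6 (by decide) (by decide)
  have h7 := pv_filter_rank hnd "stage" 7 (by decide) (by decide)
  simp only [show List.range 9 = [0,1,2,3,4,5,6,7,8] from rfl, List.map_cons, List.map_nil,
    List.foldl_cons, List.foldl_nil, List.nil_append]
  rw [h0, h1, h2, h3, h4, h5, h6, h7, hlast]
  have hflat : ∀ (l : List String) (p : String → Bool),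
      l.filter p = l.flatMap (fun x => if p x then [x] else []) := by
    intro l p
    induction l with
    | nil => rfl
    | cons a l ih =>
      rw [List.filter_cons, List.flatMap_cons, ← ih]
      split <;> simp
  rw [hflat pvPref (fun n => cs.contains n)]
  simp only [pvPref, List.flatMap_cons, List.flatMap_nil]
  simp only [List.contains_eq_mem, decide_eq_true_eq]
  simp only [List.append_assoc, List.append_nil]

-- A's second pass: appending the unseen columns, generalized over the accumulator
theorem pv_foldA (cs : List String) : ∀ (acc O : List String), cs.Nodup →
    (∀ c ∈ cs, (acc.contains c = true ↔ O.contains c = true)) →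
    cs.foldl (fun acc name => if acc.contains name then acc else acc ++ [name]) acc
      = acc ++ cs.filter (fun c => !(O.contains c)) := by
  induction cs with
  | nil => intro acc O _ _; simp
  | cons c cs ih =>
    intro acc O hnd hiff
    have hnd' := hnd.of_cons
    have hcn : c ∉ cs := (List.nodup_cons.mp hnd).1
    by_cases h : acc.contains c = true
    · have hO : c ∈ O := by simpa using (hiff c (by simp)).mp h
      simp only [List.foldl_cons, if_pos h]
      rw [ih acc O hnd' (fun c' hc' => hiff c' (by simp [hc']))]
      simp [hO]
    · have hO : c ∉ O := fun hm => h ((hiff c (by simp)).mpr (by simpa using hm))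
      simp only [List.foldl_cons, if_neg h]
      rw [ih (acc ++ [c]) O hnd' ?_]
      · simp [hO]
      · intro c' hc'
        have hne : c' ≠ c := fun he => hcn (he ▸ hc')
        have hio : c' ∈ acc ↔ c' ∈ O := by
          constructor
          · intro hm
            simpa using (hiff c' (by simp [hc'])).mp (by simpa using hm)
          · intro hm
            simpa using (hiff c' (by simp [hc'])).mpr (by simpa using hm)
        simp only [List.contains_append]
        simp [hne, hio]

-- ===== VERDICT =====
theorem table_columns_py_spec : Claim_equal_table_columns_py := by
  intro rows _
  unfold Spec_table_columns_py
  cases rows with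
  | nil => rfl
  | cons r t =>
    show table_columns_py (r :: t) = table_columns_py_alt (r :: t)
    simp only [table_columns_py, table_columns_py_alt]
    set cs : List String := (PySem.Dict.ofList r).keys with hcs
    have hnd : cs.Nodup := PySem.Dict.nodup_keys_ofList r
    have hpref : (["entity_key"] ++
        ["nseSymbol", "nsesymbol", "nameOfTheCompany", "companyName",
         "issueType", "issue_type", "stage"] : List String) = pvPref := rfl
    rw [hpref]
    have hstep : (fun (bs : List (List String)) (column : String) =>
        match PySem.List.index? (["entity_key", "nseSymbol", "nsesymbol", "nameOfTheCompany",
          "companyName", "issueType", "issue_type", "stage"] : List String) column with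
        | some i => bs.set i (bs.getD i [] ++ [column])
        | none => bs.set (["entity_key", "nseSymbol", "nsesymbol", "nameOfTheCompany",
          "companyName", "issueType", "issue_type", "stage"] : List String).length
            (bs.getD (["entity_key", "nseSymbol", "nsesymbol", "nameOfTheCompany",
          "companyName", "issueType", "issue_type", "stage"] : List String).length [] ++ [column]))
        = (fun bs c => bs.set (pvRank c) (bs.getD (pvRank c) [] ++ [c])) := by
      funext bs c
      have hp : (["entity_key", "nseSymbol", "nsesymbol", "nameOfTheCompany",
          "companyName", "issueType", "issue_type", "stage"] : List String) = pvPref := rfl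
      rw [hp]
      unfold pvRank
      cases h : PySem.List.index? pvPref c with
      | some i => simp
      | none => simp [pvPref]
    have hinit : (List.replicate ((["entity_key", "nseSymbol", "nsesymbol", "nameOfTheCompany",
          "companyName", "issueType", "issue_type", "stage"] : List String).length + 1)
          ([] : List String))
        = (List.range 9).map (fun _ => ([] : List String)) := by decide
    rw [hstep, hinit, pv_buckets, pv_bucketsB cs hnd]
    rw [pv_foldA cs _ (pvPref.filter (fun n => cs.contains n)) hnd (fun c _ => Iff.rfl)]
    congr 1
    apply List.filter_congr
    intro x hx
    have hxc : cs.contains x = true := by simpa using hx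
    by_cases hm : x ∈ pvPref
    · simp [hm, hx]
    · simp [hm, hx]
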